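-- pv_equiv track=rewrite | github.com/stoneeve415/LintCode | offer/_43_num_of_one.py | numOfOne
-- ===== SOURCE A (Python) =====
-- def numOfOne(n):
--     if n < 1:
--         return 0
--     count = 0
--     base = 1
--     round = n
--     while round > 0:
--         weight = round % 10
--         round = round // 10
--         count += round*base
--         if weight == 1:
--             count += n % base + 1
--         elif weight > 1:
--             count += base
--         base *= 10
--     return count
-- ===== SOURCE B (Python) =====
-- def numOfOne(n):
--     if n <= 0:
--         return 0
--     if n < 10:
--         return 1
--     d = 1
--     while d * 10 <= n:
--         d *= 10
--     high, rest = divmod(n, d)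
--     ones_lead = rest + 1 if high == 1 else d
--     return high * numOfOne(d - 1) + ones_lead + numOfOne(rest)
-- ===== Notes on version B (the rewrite author's own statement) =====
-- stated objective: alternative
-- what changed: Replaces A's iterative least-significant-digit closed-form accumulation (three-way case on each digit weight) by a top-down recursion on the leading digit: split n = high*d + rest at the largest power of ten d and recurse on the self-similar blocks, high*f(d-1) + leading-one count + f(rest).
import Mathlib
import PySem

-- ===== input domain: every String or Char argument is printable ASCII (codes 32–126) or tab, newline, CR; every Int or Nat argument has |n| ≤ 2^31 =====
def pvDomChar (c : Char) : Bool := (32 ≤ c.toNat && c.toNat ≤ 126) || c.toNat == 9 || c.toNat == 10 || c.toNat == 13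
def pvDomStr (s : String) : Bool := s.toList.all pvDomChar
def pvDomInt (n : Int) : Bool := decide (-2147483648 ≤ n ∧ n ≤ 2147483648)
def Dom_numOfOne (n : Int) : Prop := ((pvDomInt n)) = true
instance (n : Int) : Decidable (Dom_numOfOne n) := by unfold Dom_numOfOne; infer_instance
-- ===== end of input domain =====

-- B replaces A's iterative least-significant-digit closed-form accumulation by a
-- top-down recursion on the leading digit (split n = high*d + rest at the largest
-- power of ten d and recurse on the self-similar blocks); objective: alternative.

-- ===== PORT A =====
-- the while-loop of A: state (round, base, count), recursing on round
def numOfOneLoop (n round base count : Int) : Int :=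
  if h : round > 0 then
    numOfOneLoop n (PySem.Int.floordiv round 10) (base * 10)
      (count + (PySem.Int.floordiv round 10) * base +
        (if PySem.Int.mod round 10 = 1 then PySem.Int.mod n base + 1
         else if PySem.Int.mod round 10 > 1 then base else 0))
  else count
termination_by round.toNat
decreasing_by
  rw [PySem.Int.floordiv_eq_ediv_of_pos (by omega)]
  omega

def numOfOne (n : Int) : Int :=
  if n < 1 then 0 else numOfOneLoop n n 1 0

-- ===== PORT B =====
-- B's while-loop 'while d * 10 <= n: d *= 10'; the fuel parameter only bounds the
-- number of doublings (d starts at 1, so n.toNat steps always suffice)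
def leadPow : Nat → Int → Int → Int
  | 0, _, d => d
  | f + 1, n, d => if d * 10 ≤ n then leadPow f n (d * 10) else d

-- B's top-down recursion on the leading decimal digit; the fuel only bounds the
-- recursion depth (every recursive argument is smaller, so n.toNat + 1 suffices)
def altGo : Nat → Int → Int
  | 0, _ => 0
  | f + 1, n =>
    if n ≤ 0 then 0
    else if n < 10 then 1
    else
      PySem.Int.floordiv n (leadPow n.toNat n 1) * altGo f (leadPow n.toNat n 1 - 1)
        + (if PySem.Int.floordiv n (leadPow n.toNat n 1) = 1 then
             PySem.Int.mod n (leadPow n.toNat n 1) + 1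
           else leadPow n.toNat n 1)
        + altGo f (PySem.Int.mod n (leadPow n.toNat n 1))

def numOfOne_alt (n : Int) : Int := altGo (n.toNat + 1) n

-- ===== PRECONDITION & SPEC =====
def Spec_numOfOne (n : Int) (out : Int) : Prop := out = numOfOne_alt n
instance (n : Int) (out : Int) : Decidable (Spec_numOfOne n out) := by unfold Spec_numOfOne; infer_instance

-- ===== CLAIM (what is proved, stated in full; the proofs are below) =====
def Claim_equal_numOfOne : Prop := ∀ (n : Int), Dom_numOfOne n → Spec_numOfOne n (numOfOne n)

-- ===== LEMMAS AND PROOFS =====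

-- number of 1-digits of m (Nat-level model of B's inner loop)
def oN (m : Nat) : Nat :=
  if h : m = 0 then 0 else (if m % 10 = 1 then 1 else 0) + oN (m / 10)
termination_by m
decreasing_by exact Nat.div_lt_self (Nat.pos_of_ne_zero h) (by omega)

-- Σ_{i=1}^{n} oN i (common target of both programs)
def SN : Nat → Nat
  | 0 => 0
  | n + 1 => SN n + oN (n + 1)

-- A's contribution of the digit place of weight b (Nat-level model of one loop iteration)
def ftermB (b n : Nat) : Nat :=
  n / (b * 10) * b +
    (if n / b % 10 = 1 then n % b + 1 else if 1 < n / b % 10 then b else 0)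

-- sum of A's remaining loop iterations from place 10^k on
def tailSum (k n : Nat) : Nat :=
  if h : n / 10 ^ k = 0 then 0 else ftermB (10 ^ k) n + tailSum (k + 1) n
termination_by n / 10 ^ k
decreasing_by
  have h2 : n / 10 ^ (k + 1) = n / 10 ^ k / 10 := by
    rw [pow_succ, ← Nat.div_div_eq_div_mul]
  rw [h2]; exact Nat.div_lt_self (Nat.pos_of_ne_zero h) (by omega)

-- the first K terms of A's per-place sum, starting at place 10^k
def capSum (k : Nat) : Nat → Nat → Nat
  | 0, _ => 0
  | K + 1, n => ftermB (10 ^ k) n + capSum (k + 1) K n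

-- the 0/1 indicators 'digit at place 10^j of m is 1' for j = k .. k+K-1
def indSum (k : Nat) : Nat → Nat → Nat
  | 0, _ => 0
  | K + 1, m => (if m / 10 ^ k % 10 = 1 then 1 else 0) + indSum (k + 1) K m

lemma ftermB_of_div_zero (b n : Nat) (hb : 0 < b) (h : n / b = 0) : ftermB b n = 0 := by
  have hlt : n < b := Nat.lt_of_div_eq_zero hb h
  have h2 : n / (b * 10) = 0 := Nat.div_eq_of_lt (by nlinarith)
  simp [ftermB, h, h2]

lemma tailSum_step (k n : Nat) : tailSum k n = ftermB (10 ^ k) n + tailSum (k + 1) n := by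
  rw [tailSum.eq_def]
  by_cases h : n / 10 ^ k = 0
  · rw [dif_pos h]
    have hb : 0 < (10:Nat) ^ k := Nat.pow_pos (by omega)
    have h1 : n / 10 ^ (k + 1) = 0 := by
      rw [pow_succ, ← Nat.div_div_eq_div_mul, h]
    rw [ftermB_of_div_zero _ _ hb h, tailSum, dif_pos h1]
  · rw [dif_neg h]

-- tailSum is the capped sum once the cap covers all nonzero digits
lemma tailSum_eq_capSum : ∀ K k n, n < 10 ^ (k + K) → tailSum k n = capSum k K n := by
  intro K
  induction K with
  | zero =>
    intro k n h
    rw [tailSum, dif_pos (Nat.div_eq_of_lt (by simpa using h))]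
    rfl
  | succ K ih =>
    intro k n h
    rw [tailSum_step, capSum, ih (k + 1) n (by rw [show k + 1 + K = k + (K + 1) by omega]; exact h)]

-- A's loop computes tailSum
lemma loopEq : ∀ (fuel k : Nat) (nN : Nat) (c : Int), nN / 10 ^ k ≤ fuel →
    numOfOneLoop (nN : Int) ((nN / 10 ^ k : Nat) : Int) ((10 ^ k : Nat) : Int) c
      = c + (tailSum k nN : Int) := by
  intro fuel
  induction fuel with
  | zero =>
    intro k nN c h
    have h0 : nN / 10 ^ k = 0 := Nat.le_zero.mp h
    rw [numOfOneLoop.eq_def, dif_neg (by rw [h0]; simp), tailSum.eq_def, dif_pos h0]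
    simp
  | succ f ih =>
    intro k nN c h
    by_cases h0 : nN / 10 ^ k = 0
    · rw [numOfOneLoop.eq_def, dif_neg (by rw [h0]; simp), tailSum.eq_def, dif_pos h0]
      simp
    · rw [numOfOneLoop.eq_def,
        dif_pos (show ((nN / 10 ^ k : Nat) : Int) > 0 by exact_mod_cast Nat.pos_of_ne_zero h0)]
      have e1 : PySem.Int.floordiv ((nN / 10 ^ k : Nat) : Int) 10 = ((nN / 10 ^ (k + 1) : Nat) : Int) := by
        rw [show (10 : Int) = ((10 : Nat) : Int) from rfl, PySem.Int.floordiv_natCast,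
          Nat.div_div_eq_div_mul, ← pow_succ]
      have e2 : PySem.Int.mod ((nN / 10 ^ k : Nat) : Int) 10 = ((nN / 10 ^ k % 10 : Nat) : Int) := by
        rw [show (10 : Int) = ((10 : Nat) : Int) from rfl, PySem.Int.mod_natCast]
      have e3 : PySem.Int.mod ((nN : Nat) : Int) ((10 ^ k : Nat) : Int) = ((nN % 10 ^ k : Nat) : Int) :=
        PySem.Int.mod_natCast nN (10 ^ k)
      have e4 : ((10 ^ k : Nat) : Int) * 10 = ((10 ^ (k + 1) : Nat) : Int) := by
        push_cast [pow_succ]; ring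
      rw [e1, e2, e3, e4]
      have hle : nN / 10 ^ (k + 1) ≤ f := by
        have hst : nN / 10 ^ (k + 1) = nN / 10 ^ k / 10 := by
          rw [pow_succ, ← Nat.div_div_eq_div_mul]
        rw [hst]
        have := Nat.div_lt_self (Nat.pos_of_ne_zero h0) (show 1 < 10 by omega)
        omega
      rw [ih (k + 1) nN _ hle]
      conv_rhs => rw [tailSum_step]
      simp only [ftermB, pow_succ, Nat.cast_add, Nat.cast_mul, Nat.cast_ite, Nat.cast_one,
        Nat.cast_zero, gt_iff_lt, Nat.cast_eq_one, Nat.one_lt_cast]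
      ring_nf

-- one more number adds to place b exactly the indicator 'digit_b (n+1) = 1'
lemma ftermB_step (b n : Nat) (hb : 0 < b) :
    ftermB b (n + 1) = ftermB b n + (if (n + 1) / b % 10 = 1 then 1 else 0) := by
  have hdm := Nat.div_add_mod n b
  set m := n / b with hm
  set r := n % b with hr
  have hrb : r < b := Nat.mod_lt _ hb
  by_cases hc : r + 1 < b
  · have hn1 : n + 1 = b * m + (r + 1) := by omega
    have hd : (n + 1) / b = m := by
      rw [hn1, Nat.mul_add_div hb, Nat.div_eq_of_lt hc]
      omega
    have hmo : (n + 1) % b = r + 1 := by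
      rw [hn1, Nat.mul_add_mod, Nat.mod_eq_of_lt hc]
    have hd10 : (n + 1) / (b * 10) = n / (b * 10) := by
      rw [← Nat.div_div_eq_div_mul, ← Nat.div_div_eq_div_mul, hd, ← hm]
    simp only [ftermB, hd, hmo, hd10, ← hm, ← hr]
    split_ifs <;> omega
  · have hre : r + 1 = b := by omega
    have hmul : b * (m + 1) = b * m + b := by ring
    have hn1 : n + 1 = b * (m + 1) := by rw [hmul]; omega
    have hd : (n + 1) / b = m + 1 := by rw [hn1, Nat.mul_div_cancel_left _ hb]
    have hmo : (n + 1) % b = 0 := by rw [hn1, Nat.mul_mod_right]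
    have hdn : n / (b * 10) = m / 10 := by rw [← Nat.div_div_eq_div_mul, ← hm]
    have hdn1 : (n + 1) / (b * 10) = (m + 1) / 10 := by rw [← Nat.div_div_eq_div_mul, hd]
    have h9 : m % 10 ≤ 9 := by omega
    rcases eq_or_lt_of_le h9 with h9e | h9l
    · -- last digit of m is 9: the carry moves one full block up
      have e1 : (m + 1) / 10 = m / 10 + 1 := by omega
      have e2 : (m + 1) % 10 = 0 := by omega
      have emul : (m / 10 + 1) * b = m / 10 * b + b := by ring
      simp only [ftermB, hd, hmo, hdn, hdn1, e1, e2, emul, ← hm, ← hr]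
      split_ifs <;> omega
    · -- otherwise only the digit at place b increments
      have e1 : (m + 1) / 10 = m / 10 := by omega
      have e2 : (m + 1) % 10 = m % 10 + 1 := by omega
      simp only [ftermB, hd, hmo, hdn, hdn1, e1, e2, ← hm, ← hr]
      split_ifs <;> omega

lemma capSum_step : ∀ K k n, capSum k K (n + 1) = capSum k K n + indSum k K (n + 1) := by
  intro K
  induction K with
  | zero => intro k n; rfl
  | succ K ih =>
    intro k n
    rw [capSum, capSum, indSum, ih (k + 1) n,
      ftermB_step (10 ^ k) n (Nat.pow_pos (by omega))]
    ring

lemma indSum_zero : ∀ K k, indSum k K 0 = 0 := by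
  intro K
  induction K with
  | zero => intro k; rfl
  | succ K ih => intro k; rw [indSum, ih]; simp

lemma indSum_shift : ∀ K k m, indSum (k + 1) K m = indSum k K (m / 10) := by
  intro K
  induction K with
  | zero => intro k m; rfl
  | succ K ih =>
    intro k m
    rw [indSum, indSum, ih (k + 1) m]
    have : m / 10 ^ (k + 1) = m / 10 / 10 ^ k := by
      rw [Nat.div_div_eq_div_mul, ← pow_succ']
    rw [this]

lemma oN_eq_indSum : ∀ K m, m < 10 ^ K → oN m = indSum 0 K m := by
  intro K
  induction K with
  | zero =>
    intro m h
    interval_cases m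
    rw [oN, dif_pos rfl]
    rfl
  | succ K ih =>
    intro m h
    by_cases h0 : m = 0
    · subst h0; rw [oN, dif_pos rfl, indSum_zero]
    · have hp : (10:Nat) ^ (K + 1) = 10 ^ K * 10 := pow_succ 10 K
      have hm10 : m / 10 < 10 ^ K := by omega
      rw [oN, dif_neg h0, indSum, indSum_shift, ← ih (m / 10) hm10]
      simp

-- A's per-place total equals the brute-force total
lemma tailSum_eq_SN : ∀ n, tailSum 0 n = SN n := by
  intro n
  induction n with
  | zero =>
    rw [tailSum, dif_pos (by simp)]
    rfl
  | succ n ih =>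
    have hK : n + 1 < 10 ^ (n + 1) := Nat.lt_pow_self (by omega)
    have hKn : n < 10 ^ (n + 1) := by omega
    rw [tailSum_eq_capSum (n + 1) 0 (n + 1) (by simpa using hK),
      capSum_step, ← tailSum_eq_capSum (n + 1) 0 n (by simpa using hKn), ih,
      ← oN_eq_indSum (n + 1) (n + 1) hK]
    rfl

lemma oN_zero : oN 0 = 0 := by rw [oN]; simp

lemma oN_digit (h : Nat) (hh : h < 10) : oN h = if h = 1 then 1 else 0 := by
  interval_cases h <;> simp [oN]

-- a number splits digit-wise: ones of q*10^k + s are ones of q plus ones of s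
lemma oN_split : ∀ (k q s : Nat), s < 10 ^ k → oN (q * 10 ^ k + s) = oN q + oN s := by
  intro k
  induction k with
  | zero =>
    intro q s h
    interval_cases s
    simp [oN_zero]
  | succ k ih =>
    intro q s hs
    have hppos : 0 < (10:Nat) ^ (k + 1) := Nat.pow_pos (by omega)
    by_cases hx : q * 10 ^ (k + 1) + s = 0
    · have hq0 : q = 0 := by
        have h' : q * 10 ^ (k + 1) = 0 := by omega
        rcases Nat.mul_eq_zero.mp h' with h'' | h''
        · exact h''
        · omega
      have hs0 : s = 0 := by omega
      subst hq0; subst hs0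
      simp [oN_zero]
    · rw [oN, dif_neg hx]
      have hform : q * 10 ^ (k + 1) + s = 10 * (q * 10 ^ k) + s := by
        rw [pow_succ]; ring
      have e1 : (q * 10 ^ (k + 1) + s) % 10 = s % 10 := by
        rw [hform, Nat.mul_add_mod]
      have e2 : (q * 10 ^ (k + 1) + s) / 10 = q * 10 ^ k + s / 10 := by
        rw [hform, Nat.mul_add_div (by omega)]
      have hs10 : s / 10 < 10 ^ k := by
        have hp : (10:Nat) ^ (k + 1) = 10 ^ k * 10 := pow_succ 10 k
        omega
      rw [e1, e2, ih q (s / 10) hs10]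
      by_cases hs0 : s = 0
      · subst hs0; simp [oN_zero]
      · have hsr : oN s = (if s % 10 = 1 then 1 else 0) + oN (s / 10) := by
          rw [oN, dif_neg hs0]
        rw [hsr]; ring

lemma SN_eq_sum (m : Nat) : SN m = ∑ i ∈ Finset.range (m + 1), oN i := by
  induction m with
  | zero => simp [SN, oN_zero]
  | succ m ih => simp [SN, ih, Finset.sum_range_succ]

-- ones below h complete blocks of 10^k
lemma sum_upto_mul (k : Nat) : ∀ h : Nat,
    ∑ i ∈ Finset.range (h * 10 ^ k), oN i
      = h * SN (10 ^ k - 1) + 10 ^ k * (∑ q ∈ Finset.range h, oN q) := by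
  intro h
  induction h with
  | zero => simp
  | succ h ih =>
    have hstep : (h + 1) * 10 ^ k = h * 10 ^ k + 10 ^ k := by ring
    rw [hstep, Finset.sum_range_add, ih]
    have hinner : ∑ i ∈ Finset.range (10 ^ k), oN (h * 10 ^ k + i)
        = 10 ^ k * oN h + ∑ i ∈ Finset.range (10 ^ k), oN i := by
      rw [Finset.sum_congr rfl (fun i hi => oN_split k h i (Finset.mem_range.mp hi)),
        Finset.sum_add_distrib, Finset.sum_const, Finset.card_range, smul_eq_mul]
    have hsum : ∑ i ∈ Finset.range (10 ^ k), oN i = SN (10 ^ k - 1) := by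
      have hpos : 0 < (10:Nat) ^ k := Nat.pow_pos (by omega)
      have h1 : (10:Nat) ^ k = (10 ^ k - 1) + 1 := by omega
      conv_lhs => rw [h1]
      exact (SN_eq_sum _).symm
    rw [hinner, hsum, Finset.sum_range_succ]
    ring

-- the block identity behind B's recursive case
lemma SN_block (k h r : Nat) (hh1 : 1 ≤ h) (hh9 : h ≤ 9) (hr : r < 10 ^ k) :
    SN (h * 10 ^ k + r)
      = h * SN (10 ^ k - 1) + (if h = 1 then r + 1 else 10 ^ k) + SN r := by
  rw [SN_eq_sum, show h * 10 ^ k + r + 1 = h * 10 ^ k + (r + 1) by omega,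
    Finset.sum_range_add, sum_upto_mul]
  have htail : ∑ i ∈ Finset.range (r + 1), oN (h * 10 ^ k + i) = (r + 1) * oN h + SN r := by
    rw [Finset.sum_congr rfl
        (fun i hi => oN_split k h i (by have := Finset.mem_range.mp hi; omega)),
      Finset.sum_add_distrib, Finset.sum_const, Finset.card_range, smul_eq_mul,
      ← SN_eq_sum]
  rw [htail]
  have hiq : ∑ q ∈ Finset.range h, oN q = if h = 1 then 0 else 1 := by
    rw [Finset.sum_congr rfl
      (fun q hq => oN_digit q (by have := Finset.mem_range.mp hq; omega))]
    interval_cases h <;> norm_num [Finset.sum_range_succ]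
  have hoh : oN h = if h = 1 then 1 else 0 := oN_digit h (by omega)
  rw [hiq, hoh]
  by_cases h1 : h = 1 <;> simp [h1] <;> ring

-- the loop result is the largest power of ten not exceeding nN
lemma leadPow_pow : ∀ (m nN j : Nat), 10 ^ j ≤ nN → nN - 10 ^ j ≤ m →
    ∃ k : Nat, leadPow m (nN : Int) ((10 ^ j : Nat) : Int) = ((10 ^ k : Nat) : Int)
      ∧ 10 ^ k ≤ nN ∧ nN < 10 ^ (k + 1) := by
  intro m
  induction m with
  | zero =>
    intro nN j h1 h2
    have hpos : 0 < (10:Nat) ^ j := Nat.pow_pos (by omega)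
    have hpow : (10:Nat) ^ j < 10 ^ (j + 1) := by
      rw [pow_succ]; omega
    exact ⟨j, rfl, h1, by omega⟩
  | succ m ih =>
    intro nN j h1 h2
    have hpos : 0 < (10:Nat) ^ j := Nat.pow_pos (by omega)
    have hps : (10:Nat) ^ (j + 1) = 10 ^ j * 10 := pow_succ 10 j
    by_cases hg : 10 ^ (j + 1) ≤ nN
    · rw [leadPow, if_pos (by
        have : (10:Nat) ^ j * 10 ≤ nN := by omega
        exact_mod_cast this)]
      have hcast : ((10 ^ j : Nat) : Int) * 10 = ((10 ^ (j + 1) : Nat) : Int) := by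
        push_cast [pow_succ]; ring
      rw [hcast]
      exact ih nN (j + 1) hg (by omega)
    · rw [leadPow, if_neg (by
        intro hx
        have hx' : (10:Nat) ^ j * 10 ≤ nN := by exact_mod_cast hx
        rw [← pow_succ] at hx'
        omega)]
      exact ⟨j, rfl, h1, by omega⟩

lemma SN_digits (m : Nat) (h1 : 1 ≤ m) (h9 : m ≤ 9) : SN m = 1 := by
  induction m with
  | zero => omega
  | succ m ih =>
    rw [SN, oN_digit (m + 1) (by omega)]
    by_cases hm : m = 0
    · subst hm; simp [SN]
    · rw [ih (by omega) (by omega), if_neg (by omega)]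

-- B computes SN (the fuel hypothesis mirrors the depth bound of numOfOne_alt)
lemma altGo_eq_SN : ∀ fuel nN : Nat, nN < fuel → altGo fuel (nN : Int) = (SN nN : Int) := by
  intro fuel
  induction fuel with
  | zero => intro nN h; omega
  | succ f ih =>
    intro nN hlt
    rw [altGo]
    by_cases h0 : (nN : Int) ≤ 0
    · have hz : nN = 0 := by omega
      subst hz
      rw [if_pos (by omega)]
      simp [SN]
    · by_cases h10 : (nN : Int) < 10
      · rw [if_neg h0, if_pos h10, SN_digits nN (by omega) (by omega)]
        norm_num
      · have hge : 10 ≤ nN := by omega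
        have ht : ((nN : Int)).toNat = nN := Int.toNat_natCast nN
        obtain ⟨k, hL, hk1, hk2⟩ := leadPow_pow nN nN 0 (by simpa using (show 1 ≤ nN by omega)) (by omega)
        have hL' : leadPow ((nN : Int)).toNat (nN : Int) 1 = ((10 ^ k : Nat) : Int) := by
          rw [ht]
          simpa using hL
        set d := (10:Nat) ^ k with hd
        have hd0 : 0 < d := Nat.pow_pos (by omega)
        rw [if_neg h0, if_neg h10, hL',
          PySem.Int.floordiv_natCast, PySem.Int.mod_natCast]
        have hq1 : 1 ≤ nN / d := (Nat.one_le_div_iff hd0).mpr hk1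
        have hq9 : nN / d ≤ 9 := by
          have h' : nN / d < 10 := (Nat.div_lt_iff_lt_mul hd0).mpr (by
            rw [hd]
            calc nN < 10 ^ (k + 1) := hk2
              _ = 10 ^ k * 10 := pow_succ 10 k
              _ = 10 * 10 ^ k := by ring)
          omega
        have hrd : nN % d < d := Nat.mod_lt _ hd0
        have hdecomp : nN = nN / d * d + nN % d := by
          conv_lhs => rw [← Nat.div_add_mod nN d]
          ring
        have hcd : ((d : Nat) : Int) - 1 = ((d - 1 : Nat) : Int) := by omega
        rw [hcd, ih (d - 1) (by omega), ih (nN % d) (by omega)]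
        have hS := SN_block k (nN / d) (nN % d) hq1 hq9 hrd
        rw [← hd, ← hdecomp] at hS
        rw [hS]
        have hcond : ((nN / d : Nat) : Int) = 1 ↔ nN / d = 1 := by exact_mod_cast Iff.rfl
        by_cases hh1 : nN / d = 1
        · rw [if_pos (hcond.mpr hh1), if_pos hh1]; push_cast; ring
        · rw [if_neg (fun hx => hh1 (hcond.mp hx)), if_neg hh1]; push_cast; ring

lemma alt_eq_SN (nN : Nat) : numOfOne_alt (nN : Int) = (SN nN : Int) := by
  rw [numOfOne_alt, Int.toNat_natCast]
  exact altGo_eq_SN (nN + 1) nN (by omega)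

-- ===== VERDICT (by name: the statement is the Claim_ definition above) =====
theorem numOfOne_spec : Claim_equal_numOfOne := by
  intro n _
  unfold Spec_numOfOne numOfOne
  by_cases hn : n < 1
  · rw [if_pos hn, numOfOne_alt, altGo, if_pos (by omega)]
  · rw [if_neg hn]
    have hn0 : 0 ≤ n := by omega
    obtain ⟨nN, rfl⟩ : ∃ m : Nat, n = (m : Int) := ⟨n.toNat, (Int.toNat_of_nonneg hn0).symm⟩
    have hA : numOfOneLoop (nN : Int) (nN : Int) 1 0 = ((tailSum 0 nN : Nat) : Int) := by
      have h := loopEq nN 0 nN 0 (by simp)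
      simpa using h
    rw [hA, alt_eq_SN nN, tailSum_eq_SN]
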